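-- pv_equiv track=rewrite | github.com/moo-on/Algorithm | BOJ/choice_problem/BOJ1150_classification.py | re_duplicate
-- ===== SOURCE A (Python) =====
-- def re_duplicate(lst):
--     copy_lst = lst.copy()
--     for group in copy_lst:
--         for e in group:
--             if e + 1 in group:
--                 lst.remove(group)
--                 break
--     return lst
-- ===== SOURCE B (Python) =====
-- def re_duplicate(lst):
--     def has_consec(group):
--         s = sorted(group)
--         for a, b in zip(s, s[1:]):
--             if b - a == 1:
--                 return True
--         return False
--     lst[:] = [g for g in lst if not has_consec(g)]
--     return lst
-- ===== Notes on version B (the rewrite author's own statement) =====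
-- stated objective: simpler
-- what changed: Replace A's copy-iterate-and-remove mutation loop (a membership scan per element plus list.remove per hit) with a single filter keeping groups whose sorted copy has no adjacent pair differing by 1; both mutate lst in place and return it.
import Mathlib
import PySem

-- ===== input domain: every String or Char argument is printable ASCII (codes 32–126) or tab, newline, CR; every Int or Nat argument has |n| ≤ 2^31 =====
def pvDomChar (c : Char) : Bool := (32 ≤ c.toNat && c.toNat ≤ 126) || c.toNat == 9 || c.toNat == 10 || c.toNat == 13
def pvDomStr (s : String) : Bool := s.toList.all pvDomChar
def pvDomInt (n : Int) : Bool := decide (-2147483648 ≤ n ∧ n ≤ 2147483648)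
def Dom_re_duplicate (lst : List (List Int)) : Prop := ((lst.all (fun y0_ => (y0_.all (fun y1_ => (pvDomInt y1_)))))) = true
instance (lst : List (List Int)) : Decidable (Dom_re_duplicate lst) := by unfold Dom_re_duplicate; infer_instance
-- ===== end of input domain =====

-- B replaces A's iterate-over-a-copy-and-remove loop by one filter keeping groups whose
-- sorted copy has no adjacent pair differing by 1; equivalence is about the return value
-- (both Pythons also mutate lst in place to the same final contents and return lst itself).

-- ===== PORT A =====
-- A: copy the list, then for each group of the copy, if some e has e+1 in the group,
-- remove (the first occurrence of) that group from lst; remove? never misses here,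
-- the .getD is only totalisation.
def re_duplicate (lst : List (List Int)) : List (List Int) :=
  let copy_lst := lst
  copy_lst.foldl
    (fun acc group =>
      if group.any (fun e => group.contains (e + 1)) then
        (PySem.List.remove? acc group).getD acc
      else acc)
    lst

-- ===== PORT B =====
-- B's inner loop: scan adjacent pairs of the sorted group for a difference of 1.
def hasConsec (group : List Int) : Bool :=
  hasAdjOne (PySem.List.sorted group (fun x => x) false)
where
  hasAdjOne : List Int → Bool
    | a :: b :: t => (b - a == 1) || hasAdjOne (b :: t)
    | _ => false

def re_duplicate_alt (lst : List (List Int)) : List (List Int) :=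
  lst.filter (fun g => !hasConsec g)

-- ===== PRECONDITION & SPEC =====
def Spec_re_duplicate (lst : List (List Int)) (out : List (List Int)) : Prop := out = re_duplicate_alt lst
instance (lst : List (List Int)) (out : List (List Int)) : Decidable (Spec_re_duplicate lst out) := by unfold Spec_re_duplicate; infer_instance

-- ===== CLAIM (what is proved, stated in full; the proofs are below) =====
def Claim_equal_re_duplicate : Prop := ∀ (lst : List (List Int)), Dom_re_duplicate lst → Spec_re_duplicate lst (re_duplicate lst)

-- ===== LEMMAS AND PROOFS =====

-- A's predicate, as a Bool.
def pvP (g : List Int) : Bool := g.any (fun e => g.contains (e + 1))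

-- Python's list.remove, on an element that may be absent, coincides with List.erase.
theorem pv_remove_getD_eq_erase (acc : List (List Int)) (g : List Int) :
    (PySem.List.remove? acc g).getD acc = acc.erase g := by
  by_cases h : g ∈ acc
  · rw [PySem.List.remove?_eq_some_erase _ _ h]; rfl
  · rw [(PySem.List.remove?_eq_none_iff acc g).2 h, List.erase_of_not_mem h]
    rfl

-- A's fold only erases, and only on groups satisfying pvP.
theorem pv_fold_eq_fold_filter (c a : List (List Int)) :
    c.foldl (fun acc group =>
      if group.any (fun e => group.contains (e + 1)) then
        (PySem.List.remove? acc group).getD acc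
      else acc) a
    = (c.filter pvP).foldl (fun acc g => acc.erase g) a := by
  induction c generalizing a with
  | nil => rfl
  | cons x c ih =>
      by_cases h : (x.any fun e => x.contains (e + 1)) = true
      · simp only [List.foldl_cons, List.filter_cons, pvP, h, if_true]
        rw [pv_remove_getD_eq_erase, ih]
      · rw [Bool.not_eq_true] at h
        simp only [List.foldl_cons, List.filter_cons, pvP, h, Bool.false_eq_true, if_false]
        exact ih a

-- Erasing a list of elements none of which is a: the head survives.
theorem pv_foldl_erase_cons (a : List Int) (s l : List (List Int))
    (hs : ∀ x ∈ s, pvP x = true) (ha : pvP a = false) :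
    s.foldl (fun acc g => acc.erase g) (a :: l)
      = a :: s.foldl (fun acc g => acc.erase g) l := by
  induction s generalizing l with
  | nil => rfl
  | cons x s ih =>
      have hx : ¬ (a == x) = true := by
        intro hEq
        have : a = x := by simpa using hEq
        rw [this, hs x (by simp)] at ha; exact absurd ha (by simp)
      simp only [List.foldl_cons, List.erase_cons, if_neg hx]
      exact ih _ (fun y hy => hs y (by simp [hy]))

-- Erasing from l exactly the elements of l satisfying pvP leaves the others, in order.
theorem pv_foldl_erase_self_filter (l : List (List Int)) :
    (l.filter pvP).foldl (fun acc g => acc.erase g) l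
      = l.filter (fun g => !pvP g) := by
  induction l with
  | nil => rfl
  | cons a l ih =>
      by_cases h : pvP a = true
      · simp only [List.filter_cons, h, if_pos, List.foldl_cons]
        have : (a :: l).erase a = l := by simp
        rw [this, ih]
        simp
      · rw [Bool.not_eq_true] at h
        simp only [List.filter_cons, h]
        rw [if_neg (by simp), pv_foldl_erase_cons a _ l (fun x hx => (List.mem_filter.1 hx).2) h, ih]
        simp

-- Forward: an adjacent pair differing by 1 yields e with e and e+1 both members.
theorem pv_hasAdjOne_imp (s : List Int) (h : hasConsec.hasAdjOne s = true) :
    ∃ e ∈ s, e + 1 ∈ s := by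
  induction s with
  | nil => simp [hasConsec.hasAdjOne] at h
  | cons a s ih =>
      cases s with
      | nil => simp [hasConsec.hasAdjOne] at h
      | cons b t =>
          simp only [hasConsec.hasAdjOne, Bool.or_eq_true, beq_iff_eq] at h
          rcases h with h | h
          · exact ⟨a, by simp, by have : a + 1 = b := by omega
                                  simp [this]⟩
          · rcases ih h with ⟨e, he, he1⟩
            exact ⟨e, by simp [he], by simpa using Or.inr (by simpa using he1)⟩

-- Backward: in a ≤-sorted list containing e and e+1, some adjacent pair differs by 1.
theorem pv_imp_hasAdjOne (s : List Int) (hsort : s.Pairwise (· ≤ ·))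
    (e : Int) (he : e ∈ s) (he1 : e + 1 ∈ s) : hasConsec.hasAdjOne s = true := by
  induction s with
  | nil => simp at he
  | cons a rest ih =>
      have hpw := (List.pairwise_cons.1 hsort)
      have hrest : rest.Pairwise (· ≤ ·) := hpw.2
      have hale : ∀ x ∈ rest, a ≤ x := hpw.1
      have he1rest : e + 1 ∈ rest := by
        rcases List.mem_cons.1 he1 with h | h
        · -- e + 1 = a: then e ∈ rest with a ≤ e, impossible
          have herest : e ∈ rest := by
            rcases List.mem_cons.1 he with h' | h' <;> [omega; exact h']
          have := hale e herest; omega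
        · exact h
      rcases List.mem_cons.1 he with hea | herest
      · -- e = a; rest is nonempty
        cases rest with
        | nil => simp at he1rest
        | cons b t =>
            have hab : a ≤ b := hale b (by simp)
            have hble : b ≤ e + 1 := by
              rcases List.mem_cons.1 he1rest with h | h
              · omega
              · exact (List.pairwise_cons.1 hrest).1 _ h
            by_cases hb : b = e + 1
            · simp [hasConsec.hasAdjOne, hb, ← hea]
            · have hbe : b = e := by omega
              have : hasConsec.hasAdjOne (b :: t) = true :=
                ih hrest (by simp [hbe]) he1rest
              simp [hasConsec.hasAdjOne, this]
      · cases rest with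
        | nil => simp at herest
        | cons b t =>
            have : hasConsec.hasAdjOne (b :: t) = true := ih hrest herest he1rest
            simp [hasConsec.hasAdjOne, this]

-- The two per-group tests agree.
theorem pv_pred_eq (g : List Int) : pvP g = hasConsec g := by
  have hperm : (PySem.List.sorted g (fun x => x) false).Perm g :=
    PySem.List.sorted_perm g (fun x => x) false
  have hmem : ∀ x : Int, x ∈ PySem.List.sorted g (fun x => x) false ↔ x ∈ g :=
    fun x => hperm.mem_iff
  have hsort : (PySem.List.sorted g (fun x => x) false).Pairwise (· ≤ ·) := by
    have := PySem.List.sorted_pairwise g (fun x => x)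
    simpa using this
  by_cases h : pvP g = true
  · have : ∃ e ∈ g, e + 1 ∈ g := by
      simpa [pvP, List.any_eq_true] using h
    rcases this with ⟨e, he, he1⟩
    rw [h, hasConsec,
      pv_imp_hasAdjOne _ hsort e ((hmem e).2 he) ((hmem (e+1)).2 he1)]
  · rw [Bool.not_eq_true] at h
    rw [h]
    by_cases h2 : hasConsec.hasAdjOne (PySem.List.sorted g (fun x => x) false) = true
    · rcases pv_hasAdjOne_imp _ h2 with ⟨e, he, he1⟩
      have : pvP g = true := by
        simp only [pvP, List.any_eq_true]
        exact ⟨e, (hmem e).1 he, by simpa using (hmem (e+1)).1 he1⟩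
      rw [this] at h; cases h
    · rw [Bool.not_eq_true] at h2
      rw [hasConsec, h2]

-- ===== VERDICT (by name: the statement is the Claim_ definition above) =====
theorem re_duplicate_spec : Claim_equal_re_duplicate := by
  intro lst _
  show re_duplicate lst = re_duplicate_alt lst
  rw [re_duplicate, re_duplicate_alt]
  rw [pv_fold_eq_fold_filter, pv_foldl_erase_self_filter]
  exact List.filter_congr (fun g _ => by rw [pv_pred_eq])
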